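-- pv_equiv track=rewrite | github.com/kstephens0331/aeonforge | tools/data_analysis/batch5_advanced_analytics_tools.py | build_cash_flow_statements
-- ===== SOURCE A (Python) =====
-- from typing import Dict, List, Any, Optional, Union, Tuple
--
-- def build_cash_flow_statements(revenue: Dict, expenses: Dict, wc_assumptions: Dict) -> Dict[str, Any]:
--     operating_cf = [r - e for r, e in zip(revenue['revenue_by_year'], expenses['total_expenses'])]
--     return {
--         'operating_cash_flow': operating_cf,
--         'investing_cash_flow': [-100000] * len(operating_cf),
--         'financing_cash_flow': [0] * len(operating_cf),
--         'free_cash_flow': [ocf - 100000 for ocf in operating_cf]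
--     }
-- ===== SOURCE B (Python) =====
-- def build_cash_flow_statements(revenue, expenses, wc_assumptions):
--     # Recursive decomposition: one structural recursion over the paired series
--     # builds all four statement lists back-to-front (vs A's four staged passes).
--     def go(rs, es):
--         if not rs or not es:
--             return [], [], [], []
--         ocf = rs[0] - es[0]
--         op, inv, fin, free = go(rs[1:], es[1:])
--         return [ocf] + op, [-100000] + inv, [0] + fin, [ocf - 100000] + free
--     op, inv, fin, free = go(revenue['revenue_by_year'], expenses['total_expenses'])
--     return {
--         'operating_cash_flow': op,
--         'investing_cash_flow': inv,
--         'financing_cash_flow': fin,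
--         'free_cash_flow': free
--     }
-- ===== Notes on version B (the rewrite author's own statement) =====
-- stated objective: alternative
-- what changed: Replaces A's four staged passes (zip comprehension, two list-multiplications, a second comprehension) with one structural recursion over the paired series that constructs all four lists back-to-front in a single descent.
import Mathlib
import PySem

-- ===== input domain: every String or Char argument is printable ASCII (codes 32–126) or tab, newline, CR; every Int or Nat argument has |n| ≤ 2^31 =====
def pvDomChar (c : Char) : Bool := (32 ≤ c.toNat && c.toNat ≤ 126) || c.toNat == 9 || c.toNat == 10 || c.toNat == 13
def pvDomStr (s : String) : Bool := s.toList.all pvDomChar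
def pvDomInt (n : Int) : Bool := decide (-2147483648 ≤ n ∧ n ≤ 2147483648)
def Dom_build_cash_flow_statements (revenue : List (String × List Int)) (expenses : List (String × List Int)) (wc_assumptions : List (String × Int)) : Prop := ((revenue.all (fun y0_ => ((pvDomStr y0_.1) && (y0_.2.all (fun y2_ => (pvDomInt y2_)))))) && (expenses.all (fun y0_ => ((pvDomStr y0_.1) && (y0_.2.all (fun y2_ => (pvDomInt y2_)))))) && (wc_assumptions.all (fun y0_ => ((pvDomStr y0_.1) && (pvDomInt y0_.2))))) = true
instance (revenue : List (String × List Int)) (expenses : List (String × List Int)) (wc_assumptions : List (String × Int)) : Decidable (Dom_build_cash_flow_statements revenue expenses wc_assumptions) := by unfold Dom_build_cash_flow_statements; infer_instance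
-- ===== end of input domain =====

-- B replaces A's four staged list builds with one structural recursion over the paired series building all four lists back-to-front (alternative decomposition, same cost).
-- ===== PORT A =====
def build_cash_flow_statements (revenue : List (String × List Int)) (expenses : List (String × List Int)) (wc_assumptions : List (String × Int)) : List (String × List Int) :=
  match revenue.lookup "revenue_by_year", expenses.lookup "total_expenses" with
  | some rs, some es =>
    let operating_cf := (rs.zip es).map (fun p => p.1 - p.2)
    [("operating_cash_flow", operating_cf),
     ("investing_cash_flow", List.replicate operating_cf.length (-100000)),
     ("financing_cash_flow", List.replicate operating_cf.length 0),
     ("free_cash_flow", operating_cf.map (fun ocf => ocf - 100000))]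
  | _, _ => []  -- KeyError in Python; excluded by Pre_

-- ===== PORT B =====
-- Source B's recursive helper 'go': one descent builds the four lists back-to-front
def pvCfGo : List Int → List Int → List Int × List Int × List Int × List Int
  | [], _ => ([], [], [], [])
  | _ :: _, [] => ([], [], [], [])
  | r :: rs, e :: es =>
    let ocf := r - e
    let st := pvCfGo rs es
    (ocf :: st.1, (-100000 : Int) :: st.2.1, (0 : Int) :: st.2.2.1, (ocf - 100000) :: st.2.2.2)

def build_cash_flow_statements_alt (revenue : List (String × List Int)) (expenses : List (String × List Int)) (wc_assumptions : List (String × Int)) : List (String × List Int) :=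
  match revenue.lookup "revenue_by_year" with
  | none => []  -- KeyError in Python; excluded by Pre_
  | some rs =>
    match expenses.lookup "total_expenses" with
    | none => []  -- KeyError in Python; excluded by Pre_
    | some es =>
      let st := pvCfGo rs es
      [("operating_cash_flow", st.1),
       ("investing_cash_flow", st.2.1),
       ("financing_cash_flow", st.2.2.1),
       ("free_cash_flow", st.2.2.2)]

-- ===== PRECONDITION & SPEC =====
-- Pre_ excludes exactly the inputs where Python A raises KeyError: a missing 'revenue_by_year' or 'total_expenses' key.
def Pre_build_cash_flow_statements (revenue : List (String × List Int)) (expenses : List (String × List Int)) (wc_assumptions : List (String × Int)) : Prop :=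
  (revenue.lookup "revenue_by_year").isSome ∧ (expenses.lookup "total_expenses").isSome
instance (revenue : List (String × List Int)) (expenses : List (String × List Int)) (wc_assumptions : List (String × Int)) : Decidable (Pre_build_cash_flow_statements revenue expenses wc_assumptions) := by unfold Pre_build_cash_flow_statements; infer_instance
def pvWitness_build_cash_flow_statements : (List (String × List Int)) × (List (String × List Int)) × (List (String × Int)) :=
  ([("revenue_by_year", [200000, 250000])], [("total_expenses", [100000, 120000])], [])

def Spec_build_cash_flow_statements (revenue : List (String × List Int)) (expenses : List (String × List Int)) (wc_assumptions : List (String × Int)) (out : List (String × List Int)) : Prop := out = build_cash_flow_statements_alt revenue expenses wc_assumptions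
instance (revenue : List (String × List Int)) (expenses : List (String × List Int)) (wc_assumptions : List (String × Int)) (out : List (String × List Int)) : Decidable (Spec_build_cash_flow_statements revenue expenses wc_assumptions out) := by unfold Spec_build_cash_flow_statements; infer_instance

-- ===== CLAIM =====
def Claim_equal_build_cash_flow_statements : Prop := ∀ (revenue : List (String × List Int)) (expenses : List (String × List Int)) (wc_assumptions : List (String × Int)), Dom_build_cash_flow_statements revenue expenses wc_assumptions → Pre_build_cash_flow_statements revenue expenses wc_assumptions → Spec_build_cash_flow_statements revenue expenses wc_assumptions (build_cash_flow_statements revenue expenses wc_assumptions)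

-- ===== LEMMAS AND PROOFS =====
theorem pvCfGo_spec (rs es : List Int) :
    pvCfGo rs es =
      ((rs.zip es).map (fun p => p.1 - p.2),
       List.replicate (rs.zip es).length (-100000 : Int),
       List.replicate (rs.zip es).length (0 : Int),
       (rs.zip es).map (fun p => p.1 - p.2 - 100000)) := by
  induction rs generalizing es with
  | nil => simp [pvCfGo]
  | cons r rs ih =>
    cases es with
    | nil => simp [pvCfGo]
    | cons e es => simp [pvCfGo, ih, List.replicate_succ]

-- ===== VERDICT =====
theorem build_cash_flow_statements_spec : Claim_equal_build_cash_flow_statements := by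
  intro revenue expenses wc _ _
  unfold Spec_build_cash_flow_statements build_cash_flow_statements build_cash_flow_statements_alt
  cases revenue.lookup "revenue_by_year" with
  | none => rfl
  | some rs =>
    cases expenses.lookup "total_expenses" with
    | none => rfl
    | some es =>
      simp only [pvCfGo_spec, List.length_map]
      simp
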